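-- pv_equiv track=rewrite | github.com/kit8nino/2024-MP | 428/Labutin_Ilya/3.py | greedy_path
-- ===== SOURCE A (Python) =====
-- from collections import deque
--
-- def greedy_path(maze,start,goal):
--     queue=deque([(start,[])])
--     visited=set()
--     while queue:
--         current,path=queue.popleft()
--         if current==goal:
--             return path+[current]
--         visited.add(current)
--         row,col=current
--         neighbors=[(row-1,col),(row+1,col),(row,col-1),(row,col+1)]
--         neighbors=sorted(neighbors,key=lambda neighbor: abs(neighbor[0]-goal[0])+abs(neighbor[1]-goal[1]),)
--         for neighbor in neighbors:
--             n_row,n_col = neighbor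
--             if (0<=n_row<len(maze) and 0<=n_col<len(maze[0]) and maze[n_row][n_col]!="#" and neighbor not in visited):
--                 queue.append((neighbor,path+[current]))
--     return None
-- ===== SOURCE B (Python) =====
-- from collections import deque
--
-- def greedy_path(maze, start, goal):
--     # Precompute the set of open (non-wall, in-bounds) cells once, and carry
--     # an immutable cons-cell trail per queue entry instead of copying a path
--     # list on every enqueue; the path is materialised once at the goal.
--     width = len(maze[0]) if maze else 0
--     open_cells = {(r, c) for r, row in enumerate(maze)
--                          for c, v in enumerate(row) if c < width and v != "#"}
--     queue = deque([(start, None)])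
--     visited = set()
--     while queue:
--         current, trail = queue.popleft()
--         if current == goal:
--             out = [current]
--             while trail is not None:
--                 cell, trail = trail
--                 out.append(cell)
--             out.reverse()
--             return out
--         visited.add(current)
--         row, col = current
--         candidates = sorted(
--             [(row - 1, col), (row + 1, col), (row, col - 1), (row, col + 1)],
--             key=lambda n: abs(n[0] - goal[0]) + abs(n[1] - goal[1]),
--         )
--         step = (current, trail)
--         queue.extend((n, step) for n in candidates
--                      if n in open_cells and n not in visited)
--     return None
-- ===== Notes on version B (the rewrite author's own statement) =====
-- stated objective: alternative
-- what changed: B precomputes the set of open in-bounds cells once (replacing the per-neighbor bounds-and-wall test) and carries an immutable cons-cell trail per queue entry instead of copying a path list on every enqueue, materialising the path once at the goal.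
-- outside the precondition, e.g. on greedy_path([['.', '.'], ['#']], (0, 0), (0, 1)): A returns [(0, 0), (0, 1)], B returns [(0, 0), (0, 1)]
import Mathlib
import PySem

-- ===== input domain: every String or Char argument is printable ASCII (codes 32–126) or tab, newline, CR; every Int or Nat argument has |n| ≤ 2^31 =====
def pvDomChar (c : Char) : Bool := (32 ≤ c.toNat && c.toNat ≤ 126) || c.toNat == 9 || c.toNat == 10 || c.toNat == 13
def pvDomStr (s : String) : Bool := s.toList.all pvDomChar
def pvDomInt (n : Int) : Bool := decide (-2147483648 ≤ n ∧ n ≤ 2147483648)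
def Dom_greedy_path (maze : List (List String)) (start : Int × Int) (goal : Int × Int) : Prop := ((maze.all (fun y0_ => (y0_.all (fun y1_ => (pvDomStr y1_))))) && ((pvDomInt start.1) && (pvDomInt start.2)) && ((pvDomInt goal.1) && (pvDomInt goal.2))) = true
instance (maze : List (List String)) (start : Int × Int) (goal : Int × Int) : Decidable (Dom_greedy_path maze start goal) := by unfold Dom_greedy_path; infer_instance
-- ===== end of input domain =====

-- B precomputes the set of open in-bounds cells once and carries an immutable
-- cons-cell trail per queue entry instead of copying a path list per enqueue,
-- materialising the path once at the goal (objective: alternative).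
-- Both loops are ported with a fuel guard (the same bound in both ports, `none`
-- on exhaustion) that only makes the recursion structural.

-- ===== PORT A =====
-- One iteration of A's `while queue:` loop; queue entries are (cell, path).
def loopA (maze : List (List String)) (goal : Int × Int) :
    Nat → List ((Int × Int) × List (Int × Int)) → PySem.Set (Int × Int) →
    Option (List (Int × Int))
  | 0, _, _ => none
  | _ + 1, [], _ => none
  | fuel + 1, (current, path) :: rest, visited =>
    if current = goal then some (path ++ [current])
    else
      let vis2 := PySem.Set.add visited current
      let neighbors := PySem.List.sorted
        [(current.1 - 1, current.2), (current.1 + 1, current.2),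
         (current.1, current.2 - 1), (current.1, current.2 + 1)]
        (fun nb => |nb.1 - goal.1| + |nb.2 - goal.2|) false
      loopA maze goal fuel
        (neighbors.foldl (fun q nb =>
          if decide (0 ≤ nb.1) && decide (nb.1 < (maze.length : Int)) &&
             decide (0 ≤ nb.2) && decide (nb.2 < ((maze.headD []).length : Int)) &&
             ((maze.getD nb.1.toNat []).getD nb.2.toNat "" != "#") &&
             !(PySem.Set.contains vis2 nb)
          then q ++ [(nb, path ++ [current])] else q) rest)
        vis2

def greedy_path (maze : List (List String)) (start : Int × Int) (goal : Int × Int) :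
    Option (List (Int × Int)) :=
  loopA maze goal (5 ^ (maze.length * (maze.headD []).length + 2)) [(start, [])] PySem.Set.empty

-- ===== PORT B =====
-- Source B's set comprehension: the open in-bounds cells, computed once up front.
def openCells (maze : List (List String)) : PySem.Set (Int × Int) :=
  PySem.Set.ofList
    ((PySem.List.enumerate maze).flatMap (fun rrow =>
      (((PySem.List.enumerate rrow.2).filter (fun cv =>
          decide (cv.1 < ((maze.headD []).length : Int)) && (cv.2 != "#"))).map
        (fun cv => (rrow.1, cv.1)))))

-- One iteration of Source B's loop; a queue entry carries its cons-cell trail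
-- (nearest ancestor first; Python's None-terminated nested pairs = a List).
def loopB (maze : List (List String)) (goal : Int × Int) (opens : PySem.Set (Int × Int)) :
    Nat → List ((Int × Int) × List (Int × Int)) → PySem.Set (Int × Int) →
    Option (List (Int × Int))
  | 0, _, _ => none
  | _ + 1, [], _ => none
  | fuel + 1, (current, trail) :: rest, visited =>
    if current = goal then
      some ((trail.foldl (fun out cell => out ++ [cell]) [current]).reverse)
    else
      let vis2 := PySem.Set.add visited current
      let candidates := PySem.List.sorted
        [(current.1 - 1, current.2), (current.1 + 1, current.2),
         (current.1, current.2 - 1), (current.1, current.2 + 1)]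
        (fun nb => |nb.1 - goal.1| + |nb.2 - goal.2|) false
      loopB maze goal opens fuel
        (rest ++ (candidates.filter (fun nb =>
            PySem.Set.contains opens nb && !(PySem.Set.contains vis2 nb))).map
          (fun nb => (nb, current :: trail)))
        vis2

def greedy_path_alt (maze : List (List String)) (start : Int × Int) (goal : Int × Int) :
    Option (List (Int × Int)) :=
  loopB maze goal (openCells maze)
    (5 ^ (maze.length * (maze.headD []).length + 2)) [(start, [])] PySem.Set.empty

-- ===== PRECONDITION & SPEC =====
-- Pre_ excludes the mazes on which Python's maze[r][c] can raise IndexError: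
-- those with a row shorter than row 0 (column bounds are checked against row 0
-- only) — except when start = goal, where A returns before touching the maze.
-- On excluded mazes whose short rows the search never reaches, A still returns
-- normally (see claim cites).
def Pre_greedy_path (maze : List (List String)) (start : Int × Int) (goal : Int × Int) : Prop :=
  start = goal ∨ ∀ row ∈ maze, (maze.headD []).length ≤ row.length
instance (maze : List (List String)) (start : Int × Int) (goal : Int × Int) :
    Decidable (Pre_greedy_path maze start goal) := by unfold Pre_greedy_path; infer_instance

def pvWitness_greedy_path : List (List String) × (Int × Int) × (Int × Int) :=
  ([[".", "."], [".", "#"]], (0, 0), (1, 0))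

def Spec_greedy_path (maze : List (List String)) (start : Int × Int) (goal : Int × Int) (out : Option (List (Int × Int))) : Prop := out = greedy_path_alt maze start goal
instance (maze : List (List String)) (start : Int × Int) (goal : Int × Int) (out : Option (List (Int × Int))) : Decidable (Spec_greedy_path maze start goal out) := by unfold Spec_greedy_path; infer_instance

-- ===== CLAIM (what is proved, stated in full; the proofs are below) =====
def Claim_equal_greedy_path : Prop := ∀ (maze : List (List String)) (start : Int × Int) (goal : Int × Int), Dom_greedy_path maze start goal → Pre_greedy_path maze start goal → Spec_greedy_path maze start goal (greedy_path maze start goal)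

-- ===== LEMMAS AND PROOFS =====

theorem pvWitness_ok :
    Dom_greedy_path pvWitness_greedy_path.1 pvWitness_greedy_path.2.1 pvWitness_greedy_path.2.2 ∧
    Pre_greedy_path pvWitness_greedy_path.1 pvWitness_greedy_path.2.1 pvWitness_greedy_path.2.2 := by
  constructor <;> decide

-- Under Pre_'s row-length condition, membership in B's precomputed open set
-- is exactly A's per-neighbor bounds-and-wall test.
theorem contains_openCells (maze : List (List String))
    (hrows : ∀ row ∈ maze, (maze.headD []).length ≤ row.length) (nb : Int × Int) :
    PySem.Set.contains (openCells maze) nb =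
      (decide (0 ≤ nb.1) && decide (nb.1 < (maze.length : Int)) &&
       decide (0 ≤ nb.2) && decide (nb.2 < ((maze.headD []).length : Int)) &&
       ((maze.getD nb.1.toNat []).getD nb.2.toNat "" != "#")) := by
  rw [Bool.eq_iff_iff]
  simp only [openCells, PySem.Set.contains_iff, PySem.Set.mem_ofList, List.mem_flatMap,
    List.mem_map, List.mem_filter, PySem.List.mem_enumerate_iff, Bool.and_eq_true,
    decide_eq_true_eq, bne_iff_ne, ne_eq, zero_add]
  constructor
  · rintro ⟨⟨ri, row⟩, ⟨r, hr, heq⟩, ⟨ci, v⟩, ⟨⟨c, hc, heq2⟩, hcw, hwall⟩, rfl⟩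
    cases heq
    cases heq2
    refine ⟨⟨⟨⟨by simp, by simpa using hr⟩, by simp⟩, by simpa using hcw⟩, ?_⟩
    rw [List.getD_eq_getElem maze [] (by simpa using hr), List.getD_eq_getElem _ "" (by simpa using hc)]
    simpa using hwall
  · rintro ⟨⟨⟨⟨h1, h2⟩, h3⟩, h4⟩, h5⟩
    have hr' : nb.1.toNat < maze.length := by omega
    have hcw' : nb.2.toNat < (maze.headD []).length := by omega
    have hc' : nb.2.toNat < maze[nb.1.toNat].length :=
      lt_of_lt_of_le hcw' (hrows _ (List.getElem_mem hr'))
    rw [List.getD_eq_getElem maze [] hr', List.getD_eq_getElem _ "" hc'] at h5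
    refine ⟨(nb.1, maze[nb.1.toNat]), ⟨nb.1.toNat, hr', by rw [Int.toNat_of_nonneg h1]⟩,
      (nb.2, maze[nb.1.toNat][nb.2.toNat]),
      ⟨⟨nb.2.toNat, hc', by rw [Int.toNat_of_nonneg h3]⟩, h4, h5⟩, rfl⟩

-- Source B's goal-branch reconstruction: appending the trail to [current] and
-- reversing yields the trail reversed followed by current.
theorem reconstruct_eq (current : Int × Int) (trail : List (Int × Int)) :
    (trail.foldl (fun out cell => out ++ [cell]) [current]).reverse
      = trail.reverse ++ [current] := by
  rw [PySem.List.foldl_append_singleton_eq_self]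
  simp

-- The lockstep invariant: A's queue is B's queue with every cons-cell trail
-- replaced by the path list it denotes (the trail reversed).
theorem loop_agree (maze : List (List String)) (goal : Int × Int)
    (hrows : ∀ row ∈ maze, (maze.headD []).length ≤ row.length) :
    ∀ (fuel : Nat) (qB : List ((Int × Int) × List (Int × Int)))
      (visited : PySem.Set (Int × Int)),
      loopA maze goal fuel (qB.map (fun e => (e.1, e.2.reverse))) visited
        = loopB maze goal (openCells maze) fuel qB visited := by
  intro fuel
  induction fuel with
  | zero => intro qB visited; simp [loopA, loopB]
  | succ f ih =>
    intro qB visited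
    match qB with
    | [] => simp [loopA, loopB]
    | (c, trail) :: rest =>
      simp only [List.map_cons]
      by_cases hg : c = goal
      · simp only [loopA, loopB, if_pos hg]
        rw [reconstruct_eq]
      · simp only [loopA, loopB, if_neg hg]
        rw [PySem.List.foldl_append_if
              (f := fun nb => (nb, trail.reverse ++ [c]))]
        rw [← ih (rest ++ _) _]
        simp only [List.map_append, List.map_map, Function.comp_def, List.reverse_cons]
        simp only [contains_openCells maze hrows]

-- ===== VERDICT (by name: the statement is the Claim_ definition above) =====
theorem greedy_path_spec : Claim_equal_greedy_path := by
  intro maze start goal _ hpre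
  unfold Spec_greedy_path greedy_path greedy_path_alt
  rcases hpre with heq | hrows
  · subst heq
    obtain ⟨f, hf⟩ : ∃ f, 5 ^ (maze.length * (maze.headD []).length + 2) = f + 1 :=
      ⟨_, (Nat.succ_pred_eq_of_pos (by positivity)).symm⟩
    rw [hf]
    simp [loopA, loopB]
  · have h := loop_agree maze goal hrows (5 ^ (maze.length * (maze.headD []).length + 2))
      [(start, [])] PySem.Set.empty
    simpa using h
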